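-- pv_equiv track=rewrite | github.com/akrantz01/2800-202410-DTC02 | components/veritasai/tone/plutchik.py | return_lesser_emotions
-- ===== SOURCE A (Python) =====
-- def return_lesser_emotions(emotions: tuple) -> list[str]:
--     """
--     Match a string and return a corrsponding one.
--
--     :param emotion: A string representing an emotion
--     :return: A list with a string string representing a less intense version of that emotion
--     """
--     updated_text = []
--     emotion_map = (
--         ("joy", "serenity"),
--         ("sadness", "pensiveness"),
--         ("fear", "apprehension"),
--         ("anger", "annoyance"),
--         ("disgust", "boredom"),
--     )
--     for emotion, replacement in emotion_map:
--         updated_text.append(replacement if emotion in emotions else emotion)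
--
--     return updated_text
-- ===== SOURCE B (Python) =====
-- def return_lesser_emotions(emotions: tuple) -> list[str]:
--     """Replace each known emotion by its less intense version, keeping the map's fixed order."""
--     emotion_map = {
--         "joy": (0, "serenity"),
--         "sadness": (1, "pensiveness"),
--         "fear": (2, "apprehension"),
--         "anger": (3, "annoyance"),
--         "disgust": (4, "boredom"),
--     }
--     result = ["joy", "sadness", "fear", "anger", "disgust"]
--     for e in emotions:
--         if e in emotion_map:
--             i, r = emotion_map[e]
--             result[i] = r
--     return result
-- ===== Notes on version B (the rewrite author's own statement) =====
-- stated objective: alternative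
-- what changed: Instead of scanning the fixed 5-entry map and testing membership of each key in the input, B starts from the default list and makes one pass over the input, overwriting the slot given by a key->(index,replacement) dict.
import Mathlib
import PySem

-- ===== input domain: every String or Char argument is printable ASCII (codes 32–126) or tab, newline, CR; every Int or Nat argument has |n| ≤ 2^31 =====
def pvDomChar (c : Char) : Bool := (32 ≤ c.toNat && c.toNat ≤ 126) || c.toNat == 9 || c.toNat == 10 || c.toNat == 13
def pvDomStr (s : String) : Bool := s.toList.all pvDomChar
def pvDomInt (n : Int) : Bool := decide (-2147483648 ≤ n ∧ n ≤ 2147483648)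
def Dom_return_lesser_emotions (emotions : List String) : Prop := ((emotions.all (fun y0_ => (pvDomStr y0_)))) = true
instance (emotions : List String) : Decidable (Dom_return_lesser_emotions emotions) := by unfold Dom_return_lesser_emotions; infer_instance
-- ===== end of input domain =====

-- B replaces A's five membership scans of the input with one pass over the input
-- overwriting slots of the default list via a key->(index,replacement) map (objective: alternative).


-- ===== PORT A =====
-- the fixed emotion_map tuple of A
def pvEmotionMapA : List (String × String) :=
  [("joy", "serenity"), ("sadness", "pensiveness"), ("fear", "apprehension"),
   ("anger", "annoyance"), ("disgust", "boredom")]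

def return_lesser_emotions (emotions : List String) : List String :=
  pvEmotionMapA.foldl
    (fun updated_text p =>
      updated_text ++ [if emotions.contains p.1 then p.2 else p.1]) []

-- ===== PORT B =====
-- B's dict: key -> (index, replacement); lookup = first match, as Python dict
def pvEmotionDictB : List (String × (Nat × String)) :=
  [("joy", (0, "serenity")), ("sadness", (1, "pensiveness")), ("fear", (2, "apprehension")),
   ("anger", (3, "annoyance")), ("disgust", (4, "boredom"))]

def return_lesser_emotions_alt (emotions : List String) : List String :=
  emotions.foldl
    (fun result e =>
      match pvEmotionDictB.lookup e with
      | some (i, r) => result.set i r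
      | none => result)
    ["joy", "sadness", "fear", "anger", "disgust"]

-- ===== PRECONDITION & SPEC =====
def Spec_return_lesser_emotions (emotions : List String) (out : List String) : Prop := out = return_lesser_emotions_alt emotions
instance (emotions : List String) (out : List String) : Decidable (Spec_return_lesser_emotions emotions out) := by unfold Spec_return_lesser_emotions; infer_instance

-- ===== CLAIM (what is proved, stated in full; the proofs are below) =====
def Claim_equal_return_lesser_emotions : Prop := ∀ (emotions : List String), Dom_return_lesser_emotions emotions → Spec_return_lesser_emotions emotions (return_lesser_emotions emotions)

-- ===== LEMMAS AND PROOFS =====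

-- Invariant of B's loop: starting from any 5-element accumulator, the fold leaves
-- slot i at its replacement iff the i-th key occurs in the remaining input.
theorem pvAltFold_eq (l : List String) : ∀ (a0 a1 a2 a3 a4 : String),
    l.foldl
      (fun result e =>
        match pvEmotionDictB.lookup e with
        | some (i, r) => result.set i r
        | none => result)
      [a0, a1, a2, a3, a4] =
    [if l.contains "joy" then "serenity" else a0,
     if l.contains "sadness" then "pensiveness" else a1,
     if l.contains "fear" then "apprehension" else a2,
     if l.contains "anger" then "annoyance" else a3,
     if l.contains "disgust" then "boredom" else a4] := by
  induction l with
  | nil => intro a0 a1 a2 a3 a4; simp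
  | cons e t ih =>
    intro a0 a1 a2 a3 a4
    by_cases h0 : e = "joy"
    · subst h0; simpa [pvEmotionDictB, List.lookup, List.set] using ih "serenity" a1 a2 a3 a4
    · by_cases h1 : e = "sadness"
      · subst h1; simpa [pvEmotionDictB, List.lookup, List.set] using ih a0 "pensiveness" a2 a3 a4
      · by_cases h2 : e = "fear"
        · subst h2; simpa [pvEmotionDictB, List.lookup, List.set] using ih a0 a1 "apprehension" a3 a4
        · by_cases h3 : e = "anger"
          · subst h3; simpa [pvEmotionDictB, List.lookup, List.set] using ih a0 a1 a2 "annoyance" a4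
          · by_cases h4 : e = "disgust"
            · subst h4; simpa [pvEmotionDictB, List.lookup, List.set] using ih a0 a1 a2 a3 "boredom"
            · have hstep : List.lookup e pvEmotionDictB = none := by
                have e0 : (e == "joy") = false := beq_eq_false_iff_ne.mpr h0
                have e1 : (e == "sadness") = false := beq_eq_false_iff_ne.mpr h1
                have e2 : (e == "fear") = false := beq_eq_false_iff_ne.mpr h2
                have e3 : (e == "anger") = false := beq_eq_false_iff_ne.mpr h3
                have e4 : (e == "disgust") = false := beq_eq_false_iff_ne.mpr h4
                simp [pvEmotionDictB, List.lookup, e0, e1, e2, e3, e4]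
              rw [List.foldl_cons]
              simp only [hstep]
              rw [ih a0 a1 a2 a3 a4]
              simp [Ne.symm h0, Ne.symm h1, Ne.symm h2, Ne.symm h3, Ne.symm h4]

-- ===== VERDICT (by name: the statement is the Claim_ definition above) =====
theorem return_lesser_emotions_spec : Claim_equal_return_lesser_emotions := by
  intro emotions _
  unfold Spec_return_lesser_emotions return_lesser_emotions return_lesser_emotions_alt
  rw [pvAltFold_eq]
  simp [pvEmotionMapA]
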